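-- pv_equiv track=rewrite | github.com/slebok/zoo | hunter.py | assembleBracketedSymbols
-- ===== SOURCE A (Python) =====
-- def assembleBracketedSymbols(ts,start,end):
-- 	tss = []
-- 	terminal = False
-- 	i = 0
-- 	while (i<len(ts)):
-- 		if terminal:
-- 			tss[-1] += ts[i]
-- 			if ts[i] == end:
-- 				terminal = False
-- 		else:
-- 			tss.append(ts[i])
-- 			if ts[i] == start:
-- 				terminal = True
-- 		i += 1
-- 	return tss
-- ===== SOURCE B (Python) =====
-- def assembleBracketedSymbols(ts, start, end):
--     tss = []
--     i = 0
--     n = len(ts)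
--     while i < n:
--         t = ts[i]
--         i += 1
--         if t == start:
--             group = t
--             while i < n:
--                 group += ts[i]
--                 i += 1
--                 if ts[i - 1] == end:
--                     break
--             tss.append(group)
--         else:
--             tss.append(t)
--     return tss
-- ===== Notes on version B (the rewrite author's own statement) =====
-- stated objective: simpler
-- what changed: Replaces the maintained terminal flag and repeated mutation of the list's last element with an explicit inner consume-until-end loop that builds each bracketed group as a local string before appending it once.
import Mathlib
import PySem

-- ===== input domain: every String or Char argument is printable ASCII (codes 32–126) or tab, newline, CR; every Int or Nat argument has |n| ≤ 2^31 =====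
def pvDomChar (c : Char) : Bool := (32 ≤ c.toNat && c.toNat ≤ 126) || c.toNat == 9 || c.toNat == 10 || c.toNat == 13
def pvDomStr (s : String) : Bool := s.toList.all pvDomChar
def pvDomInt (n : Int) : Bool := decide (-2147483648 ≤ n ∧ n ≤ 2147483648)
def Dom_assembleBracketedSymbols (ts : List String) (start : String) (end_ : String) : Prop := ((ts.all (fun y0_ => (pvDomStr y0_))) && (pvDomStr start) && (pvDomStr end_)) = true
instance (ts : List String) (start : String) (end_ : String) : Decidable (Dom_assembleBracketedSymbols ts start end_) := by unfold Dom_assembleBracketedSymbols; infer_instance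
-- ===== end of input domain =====

-- B replaces A's terminal-flag state machine by an explicit consume-until-end inner loop (simpler decomposition, same cost).

-- ===== PORT A =====
-- tss[-1] += ts[i]: A only reaches this with tss nonempty (terminal is set right
-- after an append), so dropLast/getLastD is exact there.
def pvAddLast (tss : List String) (t : String) : List String :=
  tss.dropLast ++ [tss.getLastD "" ++ t]

def pvALoop (start end_ : String) : List String → Bool → List String → List String
  | [], _, tss => tss
  | t :: rest, true, tss =>
      pvALoop start end_ rest (if t = end_ then false else true) (pvAddLast tss t)
  | t :: rest, false, tss =>
      pvALoop start end_ rest (if t = start then true else false) (tss ++ [t])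

def assembleBracketedSymbols (ts : List String) (start : String) (end_ : String) : List String :=
  pvALoop start end_ ts false []

-- ===== PORT B =====
-- inner while: keep concatenating onto the group until an `end_` token was consumed
-- (or the list runs out); returns the finished group and the remaining tokens.
def pvBInner (end_ : String) : List String → String → String × List String
  | [], g => (g, [])
  | t :: rest, g => if t = end_ then (g ++ t, rest) else pvBInner end_ rest (g ++ t)

theorem pvBInner_len (end_ : String) : ∀ (l : List String) (g : String),
    (pvBInner end_ l g).2.length ≤ l.length := by
  intro l
  induction l with
  | nil => intro g; simp [pvBInner]
  | cons t rest ih =>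
      intro g
      by_cases h : t = end_ <;> simp [pvBInner, h]
      exact Nat.le_succ_of_le (ih (g ++ t))

def pvBOuter (start end_ : String) : List String → List String
  | [] => []
  | t :: rest =>
      if t = start then
        (pvBInner end_ rest t).1 :: pvBOuter start end_ (pvBInner end_ rest t).2
      else
        t :: pvBOuter start end_ rest
termination_by l => l.length
decreasing_by
  · exact Nat.lt_succ_of_le (pvBInner_len end_ rest t)
  · simp

def assembleBracketedSymbols_alt (ts : List String) (start : String) (end_ : String) : List String :=
  pvBOuter start end_ ts

-- ===== PRECONDITION & SPEC =====
def Spec_assembleBracketedSymbols (ts : List String) (start : String) (end_ : String) (out : List String) : Prop := out = assembleBracketedSymbols_alt ts start end_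
instance (ts : List String) (start : String) (end_ : String) (out : List String) : Decidable (Spec_assembleBracketedSymbols ts start end_ out) := by unfold Spec_assembleBracketedSymbols; infer_instance

-- ===== CLAIM (what is proved, stated in full; the proofs are below) =====
def Claim_equal_assembleBracketedSymbols : Prop := ∀ (ts : List String) (start : String) (end_ : String), Dom_assembleBracketedSymbols ts start end_ → Spec_assembleBracketedSymbols ts start end_ (assembleBracketedSymbols ts start end_)

-- ===== LEMMAS AND PROOFS =====

theorem pvAddLast_append (tss0 : List String) (g t : String) :
    pvAddLast (tss0 ++ [g]) t = tss0 ++ [g ++ t] := by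
  simp [pvAddLast]

-- A's terminal phase equals B's inner loop.
theorem pvALoop_true (start end_ : String) : ∀ (rest : List String) (g : String) (tss0 : List String),
    pvALoop start end_ rest true (tss0 ++ [g]) =
      pvALoop start end_ (pvBInner end_ rest g).2 false (tss0 ++ [(pvBInner end_ rest g).1]) := by
  intro rest
  induction rest with
  | nil => intro g tss0; simp [pvALoop, pvBInner]
  | cons t r ih =>
      intro g tss0
      by_cases h : t = end_
      · simp [pvALoop, pvBInner, h, pvAddLast_append]
      · simp [pvALoop, pvBInner, h, pvAddLast_append, ih (g ++ t) tss0]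

-- A's non-terminal phase equals B's outer loop (strong induction on the length,
-- since the inner loop consumes a chunk of the list).
theorem pvALoop_false (start end_ : String) : ∀ (n : Nat) (ts : List String), ts.length ≤ n →
    ∀ (tss0 : List String), pvALoop start end_ ts false tss0 = tss0 ++ pvBOuter start end_ ts := by
  intro n
  induction n with
  | zero =>
      intro ts hts tss0
      have : ts = [] := List.eq_nil_of_length_eq_zero (Nat.le_zero.mp hts)
      subst this; simp [pvALoop, pvBOuter]
  | succ n ih =>
      intro ts hts tss0
      cases ts with
      | nil => simp [pvALoop, pvBOuter]
      | cons t rest =>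
          by_cases h : t = start
          · subst h
            have h1 := pvALoop_true t end_ rest t tss0
            have h2 : (pvBInner end_ rest t).2.length ≤ n := by
              have := pvBInner_len end_ rest t
              simp at hts; omega
            simp only [pvALoop, pvBOuter, if_true]
            rw [h1, ih _ h2]
            simp
          · simp only [pvALoop, pvBOuter, if_neg h]
            rw [ih rest (by simp at hts; omega)]
            simp

-- ===== VERDICT (by name: the statement is the Claim_ definition above) =====
theorem assembleBracketedSymbols_spec : Claim_equal_assembleBracketedSymbols := by
  intro ts start end_ _
  unfold Spec_assembleBracketedSymbols assembleBracketedSymbols assembleBracketedSymbols_alt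
  simpa using pvALoop_false start end_ ts.length ts le_rfl []
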